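-- pv_equiv track=rewrite | github.com/MohammadFahad1/Learning_Python_Programming | C_Good_Sequence.py | min_removals_to_good_sequence
-- ===== SOURCE A (Python) =====
-- from collections import Counter
--
-- def min_removals_to_good_sequence(N, a):
--     freq = Counter(a)
--     removals = 0
--
--     for x, count in freq.items():
--         if count > x:
--             removals += count - x
--         else:
--             removals += count
--
--     return removals
-- ===== SOURCE B (Python) =====
-- def min_removals_to_good_sequence(N, a):
--     s = sorted(a)
--     removals = 0
--     i = 0
--     n = len(s)
--     while i < n:
--         j = i
--         while j < n and s[j] == s[i]:
--             j += 1
--         count = j - i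
--         x = s[i]
--         if count > x:
--             removals += count - x
--         else:
--             removals += count
--         i = j
--     return removals
-- ===== Notes on version B (the rewrite author's own statement) =====
-- stated objective: alternative
-- what changed: Replaced the Counter hash map with sorting a copy of the list and a single run-length scan over consecutive equal runs, accumulating the removals per run.
import Mathlib
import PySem

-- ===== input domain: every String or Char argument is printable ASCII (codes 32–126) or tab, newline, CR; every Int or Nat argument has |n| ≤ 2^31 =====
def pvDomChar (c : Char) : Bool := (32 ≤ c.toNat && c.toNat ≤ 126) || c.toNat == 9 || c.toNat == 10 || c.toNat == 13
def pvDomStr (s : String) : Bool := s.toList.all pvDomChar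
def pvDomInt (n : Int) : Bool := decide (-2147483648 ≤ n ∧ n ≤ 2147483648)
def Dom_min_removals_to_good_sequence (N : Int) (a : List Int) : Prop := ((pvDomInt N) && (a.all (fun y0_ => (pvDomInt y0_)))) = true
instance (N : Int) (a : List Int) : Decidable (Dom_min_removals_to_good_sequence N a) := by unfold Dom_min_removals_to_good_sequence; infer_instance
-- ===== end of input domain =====

-- B replaces A's Counter hash map by sorting a copy of the list and doing one run-length
-- scan over consecutive equal runs (objective: alternative decomposition, same result).

-- ===== PORT A =====
-- freq = Counter(a); then fold over freq.items() accumulating removals.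
def min_removals_to_good_sequence (N : Int) (a : List Int) : Int :=
  let freq := PySem.Dict.counter a
  freq.items.foldl
    (fun removals p => if p.2 > p.1 then removals + (p.2 - p.1) else removals + p.2) 0

-- ===== PORT B =====
-- run-length scan of the sorted list: one run (value x, length `run`) per step,
-- exactly Source B's inner while-loop (takeWhile) and outer loop advance (dropWhile).
def pvGoodRuns : List Int → Int
  | [] => 0
  | x :: rest =>
    let run : Int := 1 + (rest.takeWhile (· == x)).length
    (if run > x then run - x else run) + pvGoodRuns (rest.dropWhile (· == x))
termination_by l => l.length
decreasing_by
  simpa using Nat.lt_succ_of_le (List.length_dropWhile_le _ rest)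

def min_removals_to_good_sequence_alt (N : Int) (a : List Int) : Int :=
  pvGoodRuns (PySem.List.sorted a (fun x => x) false)

-- ===== PRECONDITION & SPEC =====
def Spec_min_removals_to_good_sequence (N : Int) (a : List Int) (out : Int) : Prop := out = min_removals_to_good_sequence_alt N a
instance (N : Int) (a : List Int) (out : Int) : Decidable (Spec_min_removals_to_good_sequence N a out) := by unfold Spec_min_removals_to_good_sequence; infer_instance

-- ===== CLAIM (what is proved, stated in full; the proofs are below) =====
def Claim_equal_min_removals_to_good_sequence : Prop := ∀ (N : Int) (a : List Int), Dom_min_removals_to_good_sequence N a → Spec_min_removals_to_good_sequence N a (min_removals_to_good_sequence N a)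

-- ===== LEMMAS AND PROOFS =====

-- per-value removal contribution
def pvF (x c : Int) : Int := if c > x then c - x else c

-- A's fold is a sum of pvF over the items
lemma pvFoldl_eq_sum (l : List (Int × Int)) (c : Int) :
    l.foldl (fun removals p => if p.2 > p.1 then removals + (p.2 - p.1) else removals + p.2) c
      = c + (l.map (fun p => pvF p.1 p.2)).sum := by
  induction l generalizing c with
  | nil => simp
  | cons p t ih =>
    simp only [List.foldl_cons, List.map_cons, List.sum_cons, ih]
    unfold pvF
    split <;> ring

-- A's result as a Finset sum over the distinct values
lemma pvA_eq_sum (N : Int) (a : List Int) :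
    min_removals_to_good_sequence N a = ∑ x ∈ a.toFinset, pvF x (a.count x) := by
  unfold min_removals_to_good_sequence
  dsimp only
  rw [PySem.Dict.items_counter, pvFoldl_eq_sum, List.map_map]
  have hmem : (PySem.Set.ofList a).toFinset = a.toFinset := by
    ext z; simp [PySem.Set.mem_ofList]
  rw [← hmem, List.sum_toFinset _ (PySem.Set.nodup_ofList a)]
  simp [Function.comp_def]

-- x does not occur in rest.dropWhile (· == x) when rest is sorted and all ≥ x
lemma pvNotMem_dropWhile (x : Int) (rest : List Int)
    (hge : ∀ z ∈ rest, x ≤ z) (hp : rest.Pairwise (· ≤ ·)) :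
    x ∉ rest.dropWhile (· == x) := by
  induction rest with
  | nil => simp
  | cons y ys ih =>
    by_cases hy : (y == x) = true
    · rw [List.dropWhile_cons, if_pos hy]
      exact ih (fun z hz => hge z (List.mem_cons_of_mem _ hz)) hp.tail
    · rw [List.dropWhile_cons, if_neg hy]
      intro hmem
      have hxy : x ≠ y := fun h => hy (by simp [h])
      have hxley : x ≤ y := hge y (List.mem_cons_self ..)
      rcases List.mem_cons.mp hmem with h | h
      · exact hxy h
      · have := (List.pairwise_cons.mp hp).1 x h
        omega

-- B's run-length scan equals the Finset sum, on a sorted list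
lemma pvGoodRuns_eq_sum (l : List Int) (hp : l.Pairwise (· ≤ ·)) :
    pvGoodRuns l = ∑ x ∈ l.toFinset, pvF x (l.count x) := by
  induction l using pvGoodRuns.induct with
  | case1 => simp [pvGoodRuns]
  | case2 x rest ih =>
    have hsplit : rest.takeWhile (· == x) ++ rest.dropWhile (· == x) = rest :=
      List.takeWhile_append_dropWhile
    set t := rest.takeWhile (· == x) with ht
    set d := rest.dropWhile (· == x) with hd
    have htall : ∀ z ∈ t, z = x := fun z hz => by
      have := List.mem_takeWhile_imp hz; simpa using this
    have hge : ∀ z ∈ rest, x ≤ z := (List.pairwise_cons.mp hp).1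
    have hxd : x ∉ d := pvNotMem_dropWhile x rest hge hp.tail
    have hpd : d.Pairwise (· ≤ ·) := List.Pairwise.sublist (List.dropWhile_sublist _) hp.tail
    -- count of x in the whole list is 1 + length of the run tail
    have hcx : ((x :: rest).count x : Int) = 1 + (t.length : Int) := by
      have h1 : (x :: rest).count x = 1 + rest.count x := by
        simp [Nat.add_comm]
      have h2 : t.count x = t.length :=
        List.count_eq_length.mpr (fun b hb => (htall b hb).symm)
      have h3 : d.count x = 0 := List.count_eq_zero.mpr hxd
      rw [h1, ← hsplit, List.count_append, h2, h3]
      push_cast; ring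
    -- counts of other values agree between the whole list and the remainder d
    have hcd : ∀ z ∈ d, (x :: rest).count z = d.count z := by
      intro z hz
      have hzx : z ≠ x := fun h => hxd (h ▸ hz)
      have hzt : t.count z = 0 :=
        List.count_eq_zero.mpr (fun hmem => hzx (htall z hmem))
      rw [← hsplit]
      simp [List.count_append, hzt, hzx.symm]
    -- the distinct values split as x plus those of d
    have hfin : (x :: rest).toFinset = insert x d.toFinset := by
      ext z
      simp only [List.toFinset_cons, Finset.mem_insert, List.mem_toFinset]
      constructor
      · rintro (h | h)
        · exact Or.inl h
        · rw [← hsplit] at h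
          rcases List.mem_append.mp h with h | h
          · exact Or.inl (htall z h)
          · exact Or.inr h
      · rintro (h | h)
        · exact Or.inl h
        · exact Or.inr (by rw [← hsplit]; exact List.mem_append_right _ h)
    have hxnot : x ∉ d.toFinset := by simpa using hxd
    rw [pvGoodRuns, hfin, Finset.sum_insert hxnot, ih hpd]
    have hifF : (if (1 + ((rest.takeWhile (· == x)).length : Int)) > x
          then (1 + ((rest.takeWhile (· == x)).length : Int)) - x
          else (1 + ((rest.takeWhile (· == x)).length : Int)))
        = pvF x ((x :: rest).count x) := by
      rw [pvF, hcx]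
    rw [hifF]
    congr 1
    exact (Finset.sum_congr rfl (fun z hz => by
      rw [hcd z (List.mem_toFinset.mp hz)]))

-- ===== VERDICT (by name: the statement is the Claim_ definition above) =====
theorem min_removals_to_good_sequence_spec : Claim_equal_min_removals_to_good_sequence := by
  intro N a _
  unfold Spec_min_removals_to_good_sequence min_removals_to_good_sequence_alt
  have hperm := PySem.List.sorted_perm a (fun x => x) false
  have hsorted : (PySem.List.sorted a (fun x => x) false).Pairwise (· ≤ ·) := by
    simpa using PySem.List.sorted_pairwise a (fun x => x)
  rw [pvA_eq_sum, pvGoodRuns_eq_sum _ hsorted, (List.toFinset_eq_of_perm _ _ hperm)]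
  exact Finset.sum_congr rfl (fun z _ => by rw [hperm.count_eq])
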